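-- pv_equiv track=rewrite | github.com/hrookim/Algorithm_python | 2023_0305/[Softeer]성적평가/main.py | find_rank_by_score
-- ===== SOURCE A (Python) =====
-- def find_rank_by_score(scores):
--     sorted_scores = sorted(scores, reverse=True)
--     ranks = {}
--
--     idx, current_rank = 0, 1
--     while idx < len(scores):
--         current_score = sorted_scores[idx]
--         if not ranks.get(current_score):
--             ranks[current_score] = current_rank
--         current_rank += 1
--         idx += 1
--     return ranks
-- ===== SOURCE B (Python) =====
-- def find_rank_by_score(scores):
--     # Count each score once, then assign ranks by prefix sums over the
--     # distinct scores in descending order (rank = #strictly greater + 1).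
--     counts = {}
--     for s in scores:
--         counts[s] = counts.get(s, 0) + 1
--     ranks = {}
--     acc = 0
--     for s in sorted(counts, reverse=True):
--         ranks[s] = acc + 1
--         acc += counts[s]
--     return ranks
-- ===== Notes on version B (the rewrite author's own statement) =====
-- stated objective: alternative
-- what changed: Replaces A's index walk over the full sorted list (rank = position of first occurrence) by a counter built in one pass plus a prefix-sum over the distinct scores sorted descending (rank = 1 + number of strictly greater scores), so only distinct scores are sorted and scanned.
import Mathlib
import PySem

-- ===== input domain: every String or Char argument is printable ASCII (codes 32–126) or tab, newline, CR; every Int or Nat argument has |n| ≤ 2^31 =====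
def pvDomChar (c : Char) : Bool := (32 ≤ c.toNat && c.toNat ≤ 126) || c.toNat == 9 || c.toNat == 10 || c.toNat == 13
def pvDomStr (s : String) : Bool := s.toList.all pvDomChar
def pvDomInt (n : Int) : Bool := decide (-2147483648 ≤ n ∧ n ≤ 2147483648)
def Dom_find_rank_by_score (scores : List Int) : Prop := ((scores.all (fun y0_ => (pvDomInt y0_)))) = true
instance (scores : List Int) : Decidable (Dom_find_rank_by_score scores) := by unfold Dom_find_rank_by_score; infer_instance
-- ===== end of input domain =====

-- B replaces A's index walk over the full sorted list by a one-pass counter plus a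
-- prefix-sum over the distinct scores sorted descending (alternative decomposition).

-- ===== PORT A =====
-- while-loop over idx < len(scores); sorted_scores[idx] is always in range there,
-- so pyGetD with default 0 is exact.
def find_rank_by_score (scores : List Int) : List (Int × Int) :=
  let sorted_scores := PySem.List.sorted scores (fun x => x) true
  let st := (PySem.List.pyRange 0 (PySem.List.len scores) 1).foldl
    (fun (p : PySem.Dict Int Int × Int) idx =>
      let current_score := PySem.List.pyGetD sorted_scores idx 0
      (if (p.1.get? current_score).getD 0 = 0 then p.1.insert current_score p.2 else p.1,
       p.2 + 1))
    (PySem.Dict.empty, 1)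
  st.1.items

-- ===== PORT B =====
def find_rank_by_score_alt (scores : List Int) : List (Int × Int) :=
  let counts := scores.foldl
    (fun (d : PySem.Dict Int Int) s => d.insert s (d.getD s 0 + 1)) PySem.Dict.empty
  let st := (PySem.List.sorted counts.keys (fun x => x) true).foldl
    (fun (p : PySem.Dict Int Int × Int) s => (p.1.insert s (p.2 + 1), p.2 + counts.getD s 0))
    (PySem.Dict.empty, 0)
  st.1.items

-- ===== PRECONDITION & SPEC =====
def Spec_find_rank_by_score (scores : List Int) (out : List (Int × Int)) : Prop := out = find_rank_by_score_alt scores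
instance (scores : List Int) (out : List (Int × Int)) : Decidable (Spec_find_rank_by_score scores out) := by unfold Spec_find_rank_by_score; infer_instance

-- ===== CLAIM (what is proved, stated in full; the proofs are below) =====
def Claim_equal_find_rank_by_score : Prop := ∀ (scores : List Int), Dom_find_rank_by_score scores → Spec_find_rank_by_score scores (find_rank_by_score scores)

-- ===== LEMMAS AND PROOFS =====

-- the distinct values of a descending-sorted list, in order (first of each run)
def pvDistincts : List Int → List Int
  | [] => []
  | x :: t => x :: pvDistincts (t.dropWhile (· == x))
termination_by L => L.length
decreasing_by
  have := List.length_dropWhile_le (· == x) t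
  simp only [List.length_cons]
  omega

-- ranks assigned to a list of distinct values, with running offset a
def pvRanks : List Int → (Int → Int) → Int → List (Int × Int)
  | [], _, _ => []
  | v :: t, cnt, a => (v, a + 1) :: pvRanks t cnt (a + cnt v)

-- A's loop body, as a function of the current score
def pvStepA (p : PySem.Dict Int Int × Int) (cur : Int) : PySem.Dict Int Int × Int :=
  (if (p.1.get? cur).getD 0 = 0 then p.1.insert cur p.2 else p.1, p.2 + 1)

theorem pvRanks_congr (S : List Int) (c1 c2 : Int → Int) (a : Int)
    (h : ∀ v ∈ S, c1 v = c2 v) : pvRanks S c1 a = pvRanks S c2 a := by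
  induction S generalizing a with
  | nil => rfl
  | cons v t ih =>
      simp only [pvRanks, h v (by simp)]
      exact congrArg _ (ih _ (fun w hw => h w (by simp [hw])))

theorem pv_lt_of_mem_dropWhile (x : Int) (t : List Int)
    (hp : t.Pairwise (· ≥ ·)) (hb : ∀ s ∈ t, s ≤ x) :
    ∀ s ∈ t.dropWhile (· == x), s < x := by
  induction t with
  | nil => simp
  | cons y t' ih =>
      rcases List.pairwise_cons.mp hp with ⟨hy, hp'⟩
      by_cases hyx : y = x
      · rw [List.dropWhile_cons_of_pos (by simp [hyx])]
        exact ih hp' (fun s hs => le_trans (hy s hs) (le_of_eq hyx))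
      · rw [List.dropWhile_cons_of_neg (by simp [hyx])]
        intro s hs
        rcases List.mem_cons.mp hs with rfl | hs'
        · exact lt_of_le_of_ne (hb s (by simp)) hyx
        · exact lt_of_le_of_lt (hy s hs') (lt_of_le_of_ne (hb y (by simp)) hyx)

theorem pv_count_run (x : Int) (t : List Int)
    (hp : t.Pairwise (· ≥ ·)) (hb : ∀ s ∈ t, s ≤ x) :
    t.count x = (t.takeWhile (· == x)).length := by
  conv_lhs => rw [← List.takeWhile_append_dropWhile (p := (· == x)) (l := t)]
  rw [List.count_append]
  have h1 : (t.takeWhile (· == x)).count x = (t.takeWhile (· == x)).length :=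
    List.count_eq_length.mpr (fun b hb' => (beq_iff_eq.mp (List.mem_takeWhile_imp (p := (· == x)) hb')).symm)
  have h2 : (t.dropWhile (· == x)).count x = 0 :=
    List.count_eq_zero.mpr (fun hx => lt_irrefl x (pv_lt_of_mem_dropWhile x t hp hb x hx))
  omega

theorem pv_mem_pvDistincts (L : List Int) (v : Int) : v ∈ pvDistincts L ↔ v ∈ L := by
  induction L using pvDistincts.induct with
  | case1 => simp [pvDistincts]
  | case2 x t ih =>
      simp only [pvDistincts, List.mem_cons, ih]
      constructor
      · rintro (rfl | h)
        · exact Or.inl rfl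
        · exact Or.inr ((List.dropWhile_sublist _).mem h)
      · rintro (rfl | h)
        · exact Or.inl rfl
        · by_cases hvx : v = x
          · exact Or.inl hvx
          · refine Or.inr ?_
            have hsplit := List.takeWhile_append_dropWhile (p := (· == x)) (l := t)
            rcases List.mem_append.mp (hsplit ▸ h) with h1 | h2
            · exact absurd (beq_iff_eq.mp (List.mem_takeWhile_imp (p := (· == x)) h1)) hvx
            · exact h2

theorem pv_pairwise_gt_pvDistincts (L : List Int) (hp : L.Pairwise (· ≥ ·)) :
    (pvDistincts L).Pairwise (· > ·) := by
  induction L using pvDistincts.induct with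
  | case1 => simp [pvDistincts]
  | case2 x t ih =>
      rcases List.pairwise_cons.mp hp with ⟨hx, hp'⟩
      rw [pvDistincts]
      refine List.pairwise_cons.mpr ⟨?_, ih (List.Pairwise.sublist (List.dropWhile_sublist _) hp')⟩
      intro s hs
      exact pv_lt_of_mem_dropWhile x t hp' hx s ((pv_mem_pvDistincts _ s).mp hs)

theorem pv_skip_run (x : Int) (K : List Int) (d : PySem.Dict Int Int) (r : Int)
    (hK : ∀ s ∈ K, s = x) (hx : (d.get? x).getD 0 ≠ 0) :
    K.foldl pvStepA (d, r) = (d, r + K.length) := by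
  induction K generalizing r with
  | nil => simp
  | cons y K' ih =>
      have hy : y = x := hK y (by simp)
      simp only [List.foldl_cons, pvStepA, hy, if_neg hx]
      rw [ih _ (fun s hs => hK s (List.mem_cons_of_mem _ hs))]
      refine congrArg _ ?_
      simp only [List.length_cons]
      push_cast
      ring

theorem pv_foldA (n : Nat) : ∀ (L : List Int) (d : PySem.Dict Int Int) (r : Int),
    L.length ≤ n → L.Pairwise (· ≥ ·) → (∀ s ∈ L, d.contains s = false) → 1 ≤ r →
    (L.foldl pvStepA (d, r)).1.items
      = d.items ++ pvRanks (pvDistincts L) (fun v => (L.count v : Int)) (r - 1) := by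
  induction n with
  | zero =>
      intro L d r hn _ _ _
      rw [List.length_eq_zero_iff.mp (Nat.le_zero.mp hn)]
      simp [pvDistincts, pvRanks]
  | succ m ih =>
      intro L d r hn hp hfresh hr
      match L with
      | [] => simp [pvDistincts, pvRanks]
      | x :: t =>
        rcases List.pairwise_cons.mp hp with ⟨hx, hp'⟩
        have hcx : d.contains x = false := hfresh x (by simp)
        have hget : (d.get? x).getD 0 = 0 := by
          rw [(PySem.Dict.get?_eq_none_iff_contains d x).mpr hcx]; rfl
        have hstep : pvStepA (d, r) x = (d.insert x r, r + 1) := by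
          simp [pvStepA, hget]
        have hsplit : t.takeWhile (· == x) ++ t.dropWhile (· == x) = t :=
          List.takeWhile_append_dropWhile
        have hlt : ∀ s ∈ t.dropWhile (· == x), s < x := pv_lt_of_mem_dropWhile x t hp' hx
        have hrun : (t.takeWhile (· == x)).foldl pvStepA (d.insert x r, r + 1)
            = (d.insert x r, r + 1 + (t.takeWhile (· == x)).length) := by
          refine pv_skip_run x _ _ _ (fun s hs => beq_iff_eq.mp (List.mem_takeWhile_imp (p := (· == x)) hs)) ?_
          rw [PySem.Dict.get?_insert_self]
          simpa using (by omega : r ≠ 0)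
        have hfresh' : ∀ s ∈ t.dropWhile (· == x), (d.insert x r).contains s = false := by
          intro s hs
          rw [PySem.Dict.contains_insert]
          have hne : s ≠ x := ne_of_lt (hlt s hs)
          have : s ∈ x :: t := List.mem_cons.mpr (Or.inr ((List.dropWhile_sublist _).mem hs))
          simp [hne, hfresh s this]
        have hlen : (t.dropWhile (· == x)).length ≤ m :=
          le_trans (List.length_dropWhile_le _ t) (by simpa using hn)
        have hrec := ih (t.dropWhile (· == x)) (d.insert x r) (r + 1 + (t.takeWhile (· == x)).length)
          hlen (List.Pairwise.sublist (List.dropWhile_sublist _) hp') hfresh' (by omega)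
        have hcntx : ((x :: t).count x : Int) = 1 + (t.takeWhile (· == x)).length := by
          rw [List.count_cons_self, pv_count_run x t hp' hx]
          push_cast; ring
        have hcongr : pvRanks (pvDistincts (t.dropWhile (· == x)))
              (fun v => ((x :: t).count v : Int)) (r + (t.takeWhile (· == x)).length)
            = pvRanks (pvDistincts (t.dropWhile (· == x)))
              (fun v => ((t.dropWhile (· == x)).count v : Int)) (r + (t.takeWhile (· == x)).length) := by
          apply pvRanks_congr
          intro v hv
          have hvdw := (pv_mem_pvDistincts _ v).mp hv
          have hvx : v ≠ x := ne_of_lt (hlt v hvdw)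
          have htw0 : (t.takeWhile (· == x)).count v = 0 :=
            List.count_eq_zero.mpr (fun hvtw => hvx (beq_iff_eq.mp (List.mem_takeWhile_imp (p := (· == x)) hvtw)))
          have : t.count v = (t.dropWhile (· == x)).count v := by
            conv_lhs => rw [← hsplit]
            rw [List.count_append, htw0]
            omega
          have h3 : List.count v (x :: t) = List.count v (List.dropWhile (· == x) t) := by
            have hxv : ¬ x = v := fun h => hvx h.symm
            rw [List.count_cons]
            simp [this, hxv]
          exact congrArg _ h3
        calc ((x :: t).foldl pvStepA (d, r)).1.items
            = ((t.takeWhile (· == x) ++ t.dropWhile (· == x)).foldl pvStepA (d.insert x r, r + 1)).1.items := by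
              rw [List.foldl_cons, hstep, hsplit]
          _ = ((t.dropWhile (· == x)).foldl pvStepA (d.insert x r, r + 1 + (t.takeWhile (· == x)).length)).1.items := by
              rw [List.foldl_append, hrun]
          _ = d.items ++ pvRanks (pvDistincts (x :: t)) (fun v => ((x :: t).count v : Int)) (r - 1) := by
              rw [hrec, PySem.Dict.items_insert_of_not_contains d r hcx]
              rw [show (r + 1 + ((t.takeWhile (· == x)).length : Int)) - 1
                    = r + (t.takeWhile (· == x)).length by ring]
              rw [hcongr.symm]
              rw [pvDistincts]
              simp only [pvRanks]
              rw [show (r : Int) - 1 + 1 = r by ring]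
              rw [show (r : Int) - 1 + ((x :: t).count x : Int)
                    = r + (t.takeWhile (· == x)).length by rw [hcntx]; ring]
              simp

theorem pv_index_loop (xs : List Int) (init : PySem.Dict Int Int × Int) :
    (PySem.List.pyRange 0 (PySem.List.len xs) 1).foldl
      (fun p idx => pvStepA p (PySem.List.pyGetD xs idx 0)) init
    = xs.foldl pvStepA init := by
  conv_rhs => rw [← PySem.List.map_pyGetD_pyRange_zero xs 0]
  rw [List.foldl_map]

theorem pv_foldB (cnt : Int → Int) : ∀ (S : List Int) (d : PySem.Dict Int Int) (a : Int),
    S.Nodup → (∀ s ∈ S, d.contains s = false) →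
    (S.foldl (fun p s => (p.1.insert s (p.2 + 1), p.2 + cnt s)) (d, a)).1.items
      = d.items ++ pvRanks S cnt a := by
  intro S
  induction S with
  | nil => intro d a _ _; simp [pvRanks]
  | cons s t ih =>
      intro d a hnd hfresh
      rcases List.nodup_cons.mp hnd with ⟨hst, hnd'⟩
      have hfresh' : ∀ w ∈ t, (d.insert s (a + 1)).contains w = false := by
        intro w hw
        rw [PySem.Dict.contains_insert]
        have hws : w ≠ s := fun h => hst (h ▸ hw)
        simp [hws, hfresh w (by simp [hw])]
      rw [List.foldl_cons, ih (d.insert s (a + 1)) (a + cnt s) hnd' hfresh',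
        PySem.Dict.items_insert_of_not_contains d (a + 1) (hfresh s (by simp))]
      simp [pvRanks]

-- ===== VERDICT (by name: the statement is the Claim_ definition above) =====
theorem find_rank_by_score_spec : Claim_equal_find_rank_by_score := by
  intro scores _
  unfold Spec_find_rank_by_score
  have hpairss : (PySem.List.sorted scores (fun x => x) true).Pairwise (· ≥ ·) := by
    simpa using PySem.List.sorted_pairwise_rev scores (fun x => x)
  have hemptyc : ∀ s : Int, s ∈ PySem.List.sorted scores (fun x => x) true →
      (PySem.Dict.empty : PySem.Dict Int Int).contains s = false := by
    intro s _; simp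
  -- A's loop over indices is the loop over the sorted list itself
  have hA : find_rank_by_score scores
      = ((PySem.List.sorted scores (fun x => x) true).foldl pvStepA (PySem.Dict.empty, 1)).1.items := by
    show (((PySem.List.pyRange 0 (PySem.List.len scores) 1).foldl
        (fun (p : PySem.Dict Int Int × Int) idx =>
          pvStepA p (PySem.List.pyGetD (PySem.List.sorted scores (fun x => x) true) idx 0))
        (PySem.Dict.empty, 1)).1.items) = _
    have hlen : PySem.List.len scores = PySem.List.len (PySem.List.sorted scores (fun x => x) true) := by
      simp [PySem.List.len, PySem.List.length_sorted]
    rw [hlen, pv_index_loop]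
  have hAval : find_rank_by_score scores
      = pvRanks (pvDistincts (PySem.List.sorted scores (fun x => x) true))
          (fun v => ((PySem.List.sorted scores (fun x => x) true).count v : Int)) 0 := by
    rw [hA, pv_foldA (PySem.List.sorted scores (fun x => x) true).length _ _ _ le_rfl hpairss hemptyc le_rfl]
    norm_num
    rfl
  -- B's sorted distinct keys are exactly the distincts of the sorted list
  have hS : PySem.List.sorted (PySem.Set.ofList scores) (fun x => x) true
      = pvDistincts (PySem.List.sorted scores (fun x => x) true) := by
    apply PySem.List.sorted_rev_eq_of_perm_of_pairwise_gt
    · refine (List.perm_ext_iff_of_nodup ?_ (PySem.Set.nodup_ofList _)).mpr ?_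
      · exact (pv_pairwise_gt_pvDistincts _ hpairss).imp (fun h => ne_of_gt h)
      · intro v
        rw [pv_mem_pvDistincts, PySem.List.mem_sorted, PySem.Set.mem_ofList]
    · exact pv_pairwise_gt_pvDistincts _ hpairss
  have hB : find_rank_by_score_alt scores
      = pvRanks (pvDistincts (PySem.List.sorted scores (fun x => x) true))
          (fun s => (PySem.Dict.counter scores).getD s 0) 0 := by
    show ((PySem.List.sorted
        (scores.foldl (fun (d : PySem.Dict Int Int) s => d.insert s (d.getD s 0 + 1)) PySem.Dict.empty).keys
        (fun x => x) true).foldl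
        (fun (p : PySem.Dict Int Int × Int) s =>
          (p.1.insert s (p.2 + 1),
           p.2 + (scores.foldl (fun (d : PySem.Dict Int Int) s => d.insert s (d.getD s 0 + 1)) PySem.Dict.empty).getD s 0))
        (PySem.Dict.empty, 0)).1.items = _
    rw [PySem.Dict.foldl_insert_getD_add_one_eq_counter, PySem.Dict.keys_counter, hS]
    have := pv_foldB (fun s => (PySem.Dict.counter scores).getD s 0)
      (pvDistincts (PySem.List.sorted scores (fun x => x) true)) PySem.Dict.empty 0
      ((pv_pairwise_gt_pvDistincts _ hpairss).imp (fun h => ne_of_gt h))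
      (fun s _ => by simp)
    simpa using this
  rw [hAval, hB]
  apply pvRanks_congr
  intro v hv
  rw [PySem.Dict.getD_counter, ((PySem.List.sorted_perm scores (fun x => x) true).count_eq v)]
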